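-- pv_equiv track=rewrite | github.com/akathorn/codejam | archive/2009/Round 1C/prisoners/prisoners.py | solve
-- ===== SOURCE A (Python) =====
-- from typing import Any, Callable, List, TypeVar, Union
--
-- def solve(cells: int, release: List[int]) -> int:
--     release = [prisoner - 1 for prisoner in release]
--
--     coins_left = 0
--     rel = release.copy()
--     last_cell = cells - 1
--     while rel:
--         # Left
--         prisoner = rel.pop()
--         coins_left += last_cell
--         last_cell = prisoner - 1
--
--     coins_right = 0
--     rel = release.copy()
--     last_cell = 0
--     while rel:
--         # Right
--         prisoner = rel.pop(0)
--         coins_right += cells - last_cell - 1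
--         last_cell = prisoner + 1
--
--     return min(coins_left, coins_right)
-- ===== SOURCE B (Python) =====
-- def solve(cells, release):
--     if not release:
--         return 0
--     left = (cells - 1) + sum(p - 2 for p in release[1:])
--     right = (cells - 1) + sum(cells - p - 1 for p in release[:-1])
--     return min(left, right)
-- ===== Notes on version B (the rewrite author's own statement) =====
-- stated objective: simpler
-- what changed: Replaced the two stateful pop()-driven while-loops and the last_cell accumulator with two closed-form sums over release[1:] and release[:-1].
import Mathlib
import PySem

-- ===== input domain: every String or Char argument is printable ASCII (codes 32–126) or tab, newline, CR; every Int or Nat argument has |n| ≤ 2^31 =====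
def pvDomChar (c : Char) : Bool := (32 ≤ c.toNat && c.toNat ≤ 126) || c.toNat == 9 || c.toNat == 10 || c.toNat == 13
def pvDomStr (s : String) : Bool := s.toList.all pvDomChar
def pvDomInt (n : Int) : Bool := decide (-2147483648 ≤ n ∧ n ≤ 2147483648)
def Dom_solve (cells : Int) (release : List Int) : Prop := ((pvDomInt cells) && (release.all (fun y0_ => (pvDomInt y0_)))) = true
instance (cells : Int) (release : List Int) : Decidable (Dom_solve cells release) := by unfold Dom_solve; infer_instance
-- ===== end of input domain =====

-- B replaces A's two stateful pop()-driven while-loops by closed-form sums over release[1:] and release[:-1] (objective: simpler).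

-- ===== PORT A =====
-- while rel: prisoner = rel.pop(); coins_left += last_cell; last_cell = prisoner - 1
def solveLoopL (rel : List Int) (coins last_cell : Int) : Int :=
  if h : rel = [] then coins
  else solveLoopL rel.dropLast (coins + last_cell) (rel.getLast h - 1)
termination_by rel.length
decreasing_by have : 0 < rel.length := List.length_pos_iff.mpr h; simp [List.length_dropLast]; omega

-- while rel: prisoner = rel.pop(0); coins_right += cells - last_cell - 1; last_cell = prisoner + 1
def solveLoopR (cells : Int) (rel : List Int) (coins last_cell : Int) : Int :=
  match rel with
  | [] => coins
  | prisoner :: rest => solveLoopR cells rest (coins + (cells - last_cell - 1)) (prisoner + 1)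

def solve (cells : Int) (release : List Int) : Int :=
  let release' := release.map (fun prisoner => prisoner - 1)
  let coins_left := solveLoopL release' 0 (cells - 1)
  let coins_right := solveLoopR cells release' 0 0
  min coins_left coins_right

-- ===== PORT B =====
def solve_alt (cells : Int) (release : List Int) : Int :=
  if release = [] then 0
  else
    let left := (cells - 1) + ((release.drop 1).map (fun p => p - 2)).sum
    let right := (cells - 1) + (release.dropLast.map (fun p => cells - p - 1)).sum
    min left right

-- ===== PRECONDITION & SPEC =====
def Spec_solve (cells : Int) (release : List Int) (out : Int) : Prop := out = solve_alt cells release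
instance (cells : Int) (release : List Int) (out : Int) : Decidable (Spec_solve cells release out) := by unfold Spec_solve; infer_instance

-- ===== CLAIM (what is proved, stated in full; the proofs are below) =====
def Claim_equal_solve : Prop := ∀ (cells : Int) (release : List Int), Dom_solve cells release → Spec_solve cells release (solve cells release)

-- ===== LEMMAS AND PROOFS =====

theorem solveLoopL_closed (l : List Int) (coins last_cell : Int) (h : l ≠ []) :
    solveLoopL l coins last_cell = coins + last_cell + ((l.drop 1).map (fun p => p - 1)).sum := by
  induction l using List.reverseRecOn generalizing coins last_cell with
  | nil => exact absurd rfl h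
  | append_singleton init a ih =>
    rw [solveLoopL.eq_def]
    by_cases hinit : init = ([] : List Int)
    · subst hinit
      simp [solveLoopL.eq_def]
    · have hne : init ++ [a] ≠ [] := by simp
      rw [dif_neg hne]
      simp only [List.dropLast_concat, List.getLast_append_singleton]
      rw [ih _ _ hinit]
      have hdrop : (init ++ [a]).drop 1 = init.drop 1 ++ [a] := by
        cases init with
        | nil => exact absurd rfl hinit
        | cons x xs => simp
      rw [hdrop]
      simp [List.sum_append]
      ring

theorem solveLoopR_closed (cells : Int) (l : List Int) (coins last_cell : Int) (h : l ≠ []) :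
    solveLoopR cells l coins last_cell
      = coins + (cells - last_cell - 1) + (l.dropLast.map (fun p => cells - (p + 1) - 1)).sum := by
  induction l generalizing coins last_cell with
  | nil => exact absurd rfl h
  | cons x xs ih =>
    cases xs with
    | nil => simp [solveLoopR]
    | cons y ys =>
      rw [solveLoopR, ih _ _ (by simp)]
      simp [List.sum_cons]
      ring

-- ===== VERDICT (by name: the statement is the Claim_ definition above) =====
theorem solve_spec : Claim_equal_solve := by
  intro cells release _
  unfold Spec_solve solve solve_alt
  by_cases h : release = []
  · subst h; simp [solveLoopL.eq_def, solveLoopR]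
  · have h' : release.map (fun prisoner => prisoner - 1) ≠ [] := by
      simpa using h
    simp only [h, if_false]
    rw [solveLoopL_closed _ _ _ h', solveLoopR_closed _ _ _ _ h']
    have hdrop : (release.map (fun p => p - 1)).drop 1 = (release.drop 1).map (fun p => p - 1) := by
      simp
    have hdl : (release.map (fun p => p - 1)).dropLast = release.dropLast.map (fun p => p - 1) := by
      simp
    rw [hdrop, hdl, List.map_map, List.map_map]
    have e1 : ((fun p : Int => p - 1) ∘ (fun p => p - 1)) = fun p => p - 2 := by
      funext p; simp only [Function.comp_apply]; ring
    have e2 : ((fun p : Int => cells - (p + 1) - 1) ∘ (fun p => p - 1)) = fun p => cells - p - 1 := by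
      funext p; simp only [Function.comp_apply]; ring
    rw [e1, e2]
    congr 1 <;> ring
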